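-- pv_equiv track=rewrite | github.com/edreamleo/make-stub-files | make_stub_files.py | reduce_numbers
-- ===== SOURCE A (Python) =====
-- def reduce_numbers(aList):
--     """
--     Return aList with all number types in aList replaced by the most
--     general numeric type in aList.
--     """
--     found = None
--     numbers = ('number', 'complex', 'float', 'long', 'int')
--     for kind in numbers:
--         for z in aList:
--             if z == kind:
--                 found = kind
--                 break
--         if found:
--             break
--     if found:
--         assert found in numbers, found
--         aList = [z for z in aList if z not in numbers]
--         aList.append(found)
--     return aList
-- ===== SOURCE B (Python) =====
-- def reduce_numbers(aList):
--     """
--     Return aList with all number types in aList replaced by the most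
--     general numeric type in aList.
--     """
--     rank = {'number': 0, 'complex': 1, 'float': 2, 'long': 3, 'int': 4}
--     best = None
--     for z in aList:
--         r = rank.get(z)
--         if r is not None and (best is None or r < best):
--             best = r
--     if best is None:
--         return aList
--     numbers = ('number', 'complex', 'float', 'long', 'int')
--     found = numbers[best]
--     return [z for z in aList if z not in numbers] + [found]
-- ===== Notes on version B (the rewrite author's own statement) =====
-- stated objective: alternative
-- what changed: Replaces A's nested kind-by-kind scan (up to 5 passes over aList) with one pass over aList maintaining the minimum generality rank of any numeric name seen, then indexing the rank back to its name.
import Mathlib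
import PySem

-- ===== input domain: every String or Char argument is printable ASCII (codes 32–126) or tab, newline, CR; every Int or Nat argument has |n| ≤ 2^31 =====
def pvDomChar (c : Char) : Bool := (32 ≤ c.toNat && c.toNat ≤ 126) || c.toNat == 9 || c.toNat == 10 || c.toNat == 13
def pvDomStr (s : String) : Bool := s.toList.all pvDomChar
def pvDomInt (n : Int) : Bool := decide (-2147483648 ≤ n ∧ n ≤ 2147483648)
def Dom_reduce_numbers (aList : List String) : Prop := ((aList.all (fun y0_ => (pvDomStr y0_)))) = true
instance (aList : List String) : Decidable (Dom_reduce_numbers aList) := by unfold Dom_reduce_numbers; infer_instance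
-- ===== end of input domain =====

-- B replaces A's nested kind-by-kind scan with one pass over aList keeping the minimum
-- generality rank of any numeric name seen (objective: alternative decomposition).

-- ===== PORT A =====
def pvNumbers : List String := ["number", "complex", "float", "long", "int"]

-- inner loop: `for z in aList: if z == kind: found = kind; break`
def pvInnerScan : List String → String → Option String
  | [], _ => none
  | z :: zs, kind => if z == kind then some kind else pvInnerScan zs kind

-- outer loop: `for kind in numbers: … ; if found: break`
def pvFindKind (aList : List String) : List String → Option String
  | [] => none
  | kind :: kinds =>
    match pvInnerScan aList kind with
    | some f => some f
    | none => pvFindKind aList kinds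

def reduce_numbers (aList : List String) : List String :=
  match pvFindKind aList pvNumbers with
  | some found => (aList.filter (fun z => !(pvNumbers.contains z))) ++ [found]
  | none => aList

-- ===== PORT B =====
def pvRank : PySem.Dict String Int :=
  PySem.Dict.ofList [("number", 0), ("complex", 1), ("float", 2), ("long", 3), ("int", 4)]

-- loop body: `r = rank.get(z); if r is not None and (best is None or r < best): best = r`
def pvStep (best : Option Int) (z : String) : Option Int :=
  match pvRank.get? z with
  | some r =>
    match best with
    | none => some r
    | some b => if r < b then some r else some b
  | none => best

def pvBest (aList : List String) : Option Int := aList.foldl pvStep none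

def reduce_numbers_alt (aList : List String) : List String :=
  match pvBest aList with
  | none => aList
  | some best =>
    -- numbers[best]: best always lies in 0..4, so the total-form default is never used (exact)
    let numbers : List String := ["number", "complex", "float", "long", "int"]
    (aList.filter (fun z => !(numbers.contains z))) ++ [PySem.List.pyGetD numbers best ""]

-- ===== PRECONDITION & SPEC =====
def Spec_reduce_numbers (aList : List String) (out : List String) : Prop := out = reduce_numbers_alt aList
instance (aList : List String) (out : List String) : Decidable (Spec_reduce_numbers aList out) := by unfold Spec_reduce_numbers; infer_instance

-- ===== CLAIM (what is proved, stated in full; the proofs are below) =====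
def Claim_equal_reduce_numbers : Prop := ∀ (aList : List String), Dom_reduce_numbers aList → Spec_reduce_numbers aList (reduce_numbers aList)

-- ===== LEMMAS AND PROOFS =====

-- A's inner scan just decides membership
theorem pvInnerScan_eq (l : List String) (k : String) :
    pvInnerScan l k = if l.contains k then some k else none := by
  induction l with
  | nil => rfl
  | cons z zs ih =>
    by_cases h : z = k
    · subst h; simp [pvInnerScan]
    · simp [pvInnerScan, h, Ne.symm h, ih]

-- pointwise min of two option-ranks, as B's loop combines them
def pvOptMin : Option Int → Option Int → Option Int
  | none, b => b
  | some a, none => some a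
  | some a, some b => if b < a then some b else some a

theorem pvOptMin_assoc (a b c : Option Int) :
    pvOptMin (pvOptMin a b) c = pvOptMin a (pvOptMin b c) := by
  rcases a with _ | a <;> rcases b with _ | b <;> rcases c with _ | c <;>
    simp only [pvOptMin] <;> split_ifs <;> (try simp only [pvOptMin]) <;> split_ifs <;>
      first | rfl | (exact congrArg some (by omega))

theorem pvStep_eq (a : Option Int) (z : String) : pvStep a z = pvOptMin a (pvRank.get? z) := by
  rcases h : pvRank.get? z with _ | r <;> rcases a with _ | b <;> simp [pvStep, pvOptMin, h]

-- B's fold with any accumulator: the accumulator combines on the left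
theorem pvBest_acc (l : List String) (acc : Option Int) :
    l.foldl pvStep acc = pvOptMin acc (pvBest l) := by
  induction l generalizing acc with
  | nil => cases acc <;> rfl
  | cons z zs ih =>
    have hc : pvBest (z :: zs) = pvOptMin (pvRank.get? z) (pvBest zs) := by
      show zs.foldl pvStep (pvStep none z) = _
      rw [ih, pvStep_eq]; rfl
    show zs.foldl pvStep (pvStep acc z) = _
    rw [ih, pvStep_eq, hc, pvOptMin_assoc]

-- B's minimum rank, characterised by membership in rank order
theorem pvBest_eq (l : List String) :
    pvBest l =
      if l.contains "number" then some 0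
      else if l.contains "complex" then some 1
      else if l.contains "float" then some 2
      else if l.contains "long" then some 3
      else if l.contains "int" then some 4
      else none := by
  induction l with
  | nil => rfl
  | cons z zs ih =>
    have hcons : pvBest (z :: zs) = pvOptMin (pvRank.get? z) (pvBest zs) := by
      show zs.foldl pvStep (pvStep none z) = _
      rw [pvBest_acc, pvStep_eq]; rfl
    rw [hcons, ih]
    by_cases h0 : z = "number"
    · subst h0
      have hr : pvRank.get? "number" = some 0 := by decide
      rw [hr]
      simp only [List.contains_cons]
      generalize zs.contains "number" = b0
      generalize zs.contains "complex" = b1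
      generalize zs.contains "float" = b2
      generalize zs.contains "long" = b3
      generalize zs.contains "int" = b4
      revert b0 b1 b2 b3 b4
      decide
    by_cases h1 : z = "complex"
    · subst h1
      have hr : pvRank.get? "complex" = some 1 := by decide
      rw [hr]
      simp only [List.contains_cons]
      generalize zs.contains "number" = b0
      generalize zs.contains "complex" = b1
      generalize zs.contains "float" = b2
      generalize zs.contains "long" = b3
      generalize zs.contains "int" = b4
      revert b0 b1 b2 b3 b4
      decide
    by_cases h2 : z = "float"
    · subst h2
      have hr : pvRank.get? "float" = some 2 := by decide
      rw [hr]
      simp only [List.contains_cons]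
      generalize zs.contains "number" = b0
      generalize zs.contains "complex" = b1
      generalize zs.contains "float" = b2
      generalize zs.contains "long" = b3
      generalize zs.contains "int" = b4
      revert b0 b1 b2 b3 b4
      decide
    by_cases h3 : z = "long"
    · subst h3
      have hr : pvRank.get? "long" = some 3 := by decide
      rw [hr]
      simp only [List.contains_cons]
      generalize zs.contains "number" = b0
      generalize zs.contains "complex" = b1
      generalize zs.contains "float" = b2
      generalize zs.contains "long" = b3
      generalize zs.contains "int" = b4
      revert b0 b1 b2 b3 b4
      decide
    by_cases h4 : z = "int"
    · subst h4
      have hr : pvRank.get? "int" = some 4 := by decide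
      rw [hr]
      simp only [List.contains_cons]
      generalize zs.contains "number" = b0
      generalize zs.contains "complex" = b1
      generalize zs.contains "float" = b2
      generalize zs.contains "long" = b3
      generalize zs.contains "int" = b4
      revert b0 b1 b2 b3 b4
      decide
    · have hmk : pvRank = PySem.Dict.mk [("number", 0), ("complex", 1), ("float", 2), ("long", 3), ("int", 4)] := by decide
      have hr : pvRank.get? z = none := by
        simp [hmk, Ne.symm h0, Ne.symm h1, Ne.symm h2, Ne.symm h3,
          Ne.symm h4, PySem.Dict.get?]
      simp [hr, pvOptMin, Ne.symm h0, Ne.symm h1, Ne.symm h2, Ne.symm h3,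
        Ne.symm h4]

-- ===== VERDICT (by name: the statement is the Claim_ definition above) =====
theorem reduce_numbers_spec : Claim_equal_reduce_numbers := by
  intro aList _
  show reduce_numbers aList = reduce_numbers_alt aList
  unfold reduce_numbers reduce_numbers_alt
  rw [pvBest_eq]
  simp only [pvFindKind, pvNumbers, pvInnerScan_eq]
  by_cases c0 : "number" ∈ aList <;>
  by_cases c1 : "complex" ∈ aList <;>
  by_cases c2 : "float" ∈ aList <;>
  by_cases c3 : "long" ∈ aList <;>
  by_cases c4 : "int" ∈ aList <;>
    simp [c0, c1, c2, c3, c4, PySem.List.pyGetD]
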